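-- pv_equiv track=rewrite | github.com/cdev-framework/cdev-sdk | src/core/utils/fs_manager/package_optimizer.py | _find_all_top_modules
-- ===== SOURCE A (Python) =====
-- from typing import Dict, List, Set, Tuple
--
-- def _find_all_top_modules(
--     used_modules: Set[str], pkged_module_dependencies_data: Dict[str, List[str]]
-- ) -> Set[str]:
--     """Given the dependency information about packaged modules, find the modules
--     that do are not a dependency for another module. This represent the set of modules
--     that must explicitly be packaged if used by a function.
--
--     Args:
--         used_modules (Set[str]): modules directly imported
--         pkged_module_dependencies_data (Dict[str, List[str]])
--
--     Returns:
--         Set[str]: Modules that are not a dependency for another module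
--     """
--
--     all_modules_names = set(used_modules)
--
--     for _, dependencies in list(
--         filter(lambda k: k[0] in used_modules, pkged_module_dependencies_data.items())
--     ):
--
--         for dependency in dependencies:
--             try:
--                 all_modules_names.remove(dependency)
--             except Exception as e:
--                 pass
--
--     return all_modules_names
-- ===== SOURCE B (Python) =====
-- from typing import Dict, List, Set
--
--
-- def _find_all_top_modules(
--     used_modules: Set[str], pkged_module_dependencies_data: Dict[str, List[str]]
-- ) -> Set[str]:
--     def is_dependency(module: str) -> bool:
--         return any(
--             module in pkged_module_dependencies_data.get(u, ())
--             for u in used_modules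
--         )
--
--     return {m for m in used_modules if not is_dependency(m)}
-- ===== Notes on version B (the rewrite author's own statement) =====
-- stated objective: alternative
-- what changed: B is candidate-driven: each used module is kept iff it does not occur in the dependency list looked up (dict.get) for any used module, a stateless filter predicate with no mutable result set and no per-element try/except removals; it trades speed (a quadratic candidate-by-candidate scan) for directness versus A's dict-driven mutation pass.
import Mathlib
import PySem

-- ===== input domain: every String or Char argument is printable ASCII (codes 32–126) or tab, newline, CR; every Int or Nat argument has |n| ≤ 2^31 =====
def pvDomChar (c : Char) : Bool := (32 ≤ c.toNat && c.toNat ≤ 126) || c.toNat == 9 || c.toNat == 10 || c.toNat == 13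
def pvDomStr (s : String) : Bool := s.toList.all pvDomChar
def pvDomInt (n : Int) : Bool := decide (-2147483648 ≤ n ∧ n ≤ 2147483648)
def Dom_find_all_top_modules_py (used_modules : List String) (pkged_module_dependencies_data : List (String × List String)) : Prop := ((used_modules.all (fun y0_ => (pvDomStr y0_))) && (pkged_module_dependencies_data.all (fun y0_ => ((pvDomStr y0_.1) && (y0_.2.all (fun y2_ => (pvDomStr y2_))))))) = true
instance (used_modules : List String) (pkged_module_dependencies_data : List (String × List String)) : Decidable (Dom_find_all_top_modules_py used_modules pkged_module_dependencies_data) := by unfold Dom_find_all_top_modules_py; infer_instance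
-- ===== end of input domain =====

-- B replaces A's dict-driven pass (mutating a result set by per-element try/except removes)
-- by a candidate-driven filter: each used module is kept iff no used module's looked-up
-- dependency list contains it (objective: alternative; return values proved equal).

-- ===== PORT A =====
-- all_modules_names = set(used_modules); the filtered dict items are walked and each
-- try: remove / except: pass is PySem.Set.discard.
def find_all_top_modules_py (used_modules : List String) (pkged_module_dependencies_data : List (String × List String)) : List String :=
  let all_modules_names := PySem.Set.ofList used_modules
  let filtered := pkged_module_dependencies_data.filter (fun k => PySem.Set.contains used_modules k.1)
  filtered.foldl (fun s kv => kv.2.foldl (fun s d => PySem.Set.discard s d) s) all_modules_names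

-- ===== PORT B =====
-- pkged_module_dependencies_data.get(u, ()): first-match association-list lookup,
-- ported by hand with List.find? (exact for a Python dict, whose keys are unique — Pre_).
def assocGetD (pkg : List (String × List String)) (u : String) : List String :=
  match pkg.find? (fun kv => kv.1 == u) with
  | some kv => kv.2
  | none => []

-- is_dependency(m) = any(m in pkg.get(u, ()) for u in used_modules);
-- {m for m in used_modules if not is_dependency(m)} builds a set from the kept candidates.
def find_all_top_modules_py_alt (used_modules : List String) (pkged_module_dependencies_data : List (String × List String)) : List String :=
  PySem.Set.ofList (used_modules.filter (fun m =>
    !(used_modules.any (fun u => (assocGetD pkged_module_dependencies_data u).contains m))))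

-- ===== PRECONDITION & SPEC =====
-- Pre_ excludes association lists with duplicate keys, which no Python dict can realize
-- (the assoc-list encoding of a dict always has distinct keys).
def Pre_find_all_top_modules_py (used_modules : List String) (pkged_module_dependencies_data : List (String × List String)) : Prop :=
  (pkged_module_dependencies_data.map Prod.fst).Nodup
instance (used_modules : List String) (pkged_module_dependencies_data : List (String × List String)) : Decidable (Pre_find_all_top_modules_py used_modules pkged_module_dependencies_data) := by unfold Pre_find_all_top_modules_py; infer_instance

def pvWitness_find_all_top_modules_py : List String × (List (String × List String)) :=
  (["a", "b"], [("a", ["b"]), ("c", ["a"])])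

def Spec_find_all_top_modules_py (used_modules : List String) (pkged_module_dependencies_data : List (String × List String)) (out : List String) : Prop := out = find_all_top_modules_py_alt used_modules pkged_module_dependencies_data
instance (used_modules : List String) (pkged_module_dependencies_data : List (String × List String)) (out : List String) : Decidable (Spec_find_all_top_modules_py used_modules pkged_module_dependencies_data out) := by unfold Spec_find_all_top_modules_py; infer_instance

-- ===== CLAIM =====
def Claim_equal_find_all_top_modules_py : Prop := ∀ (used_modules : List String) (pkged_module_dependencies_data : List (String × List String)), Dom_find_all_top_modules_py used_modules pkged_module_dependencies_data → Pre_find_all_top_modules_py used_modules pkged_module_dependencies_data → Spec_find_all_top_modules_py used_modules pkged_module_dependencies_data (find_all_top_modules_py used_modules pkged_module_dependencies_data)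

-- ===== LEMMAS AND PROOFS =====

-- removing each element of ds in turn is one filter
theorem foldl_discard_eq_filter (ds s : List String) :
    ds.foldl (fun s d => PySem.Set.discard s d) s = s.filter (fun x => !ds.contains x) := by
  induction ds generalizing s with
  | nil => simp
  | cons d ds ih =>
    show ds.foldl _ (PySem.Set.discard s d) = _
    rw [ih]
    show (s.filter (fun y => !(y == d))).filter _ = _
    rw [List.filter_filter]
    apply List.filter_congr
    intro x _
    by_cases h : x = d <;> simp [h]

-- A's nested loop is one filter over the concatenated dependency lists
theorem foldl_nested_eq_filter (l : List (String × List String)) (s : List String) :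
    l.foldl (fun s kv => kv.2.foldl (fun s d => PySem.Set.discard s d) s) s
      = s.filter (fun x => !l.any (fun kv => kv.2.contains x)) := by
  induction l generalizing s with
  | nil => simp
  | cons kv l ih =>
    show l.foldl _ (kv.2.foldl _ s) = _
    rw [ih, foldl_discard_eq_filter, List.filter_filter]
    apply List.filter_congr
    intro x _
    by_cases h : x ∈ kv.2 <;> simp [h]

-- discard commutes with filter
theorem filter_discard (p : String → Bool) (s : List String) (x : String) :
    (PySem.Set.discard s x).filter p = PySem.Set.discard (s.filter p) x := by
  show (s.filter _).filter p = (s.filter p).filter _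
  rw [List.filter_filter, List.filter_filter]
  apply List.filter_congr
  intro y _
  exact Bool.and_comm _ _

-- dedup-first (set) commutes with filter
theorem filter_ofList (p : String → Bool) (l : List String) :
    (PySem.Set.ofList l).filter p = PySem.Set.ofList (l.filter p) := by
  induction l with
  | nil => simp [PySem.Set.ofList_nil]
  | cons x xs ih =>
    by_cases hp : p x = true
    · rw [PySem.Set.ofList_cons, List.filter_cons, if_pos hp, filter_discard, ih,
        List.filter_cons, if_pos hp, PySem.Set.ofList_cons]
    · rw [PySem.Set.ofList_cons, List.filter_cons, if_neg hp, filter_discard, ih,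
        List.filter_cons, if_neg hp]
      show (PySem.Set.ofList (xs.filter p)).filter _ = _
      apply List.filter_eq_self.mpr
      intro y hy
      have hyx : y ≠ x := fun h => hp (h ▸ List.of_mem_filter ((PySem.Set.mem_ofList _ _).mp hy))
      simp [hyx]

-- first-match lookup finds the unique entry when keys are distinct
theorem find?_of_nodup_keys (pkg : List (String × List String)) (kv : String × List String)
    (hnd : (pkg.map Prod.fst).Nodup) (hmem : kv ∈ pkg) :
    assocGetD pkg kv.1 = kv.2 := by
  induction pkg with
  | nil => cases hmem
  | cons hd tl ih =>
    rcases List.mem_cons.mp hmem with rfl | htl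
    · simp [assocGetD]
    · have hne : hd.1 ≠ kv.1 := by
        intro h
        have : kv.1 ∈ tl.map Prod.fst := List.mem_map.mpr ⟨kv, htl, rfl⟩
        rw [← h] at this
        exact (List.nodup_cons.mp hnd).1 this
      have : (hd.1 == kv.1) = false := by simpa using hne
      simp only [assocGetD, List.find?_cons, this]
      exact ih (List.nodup_cons.mp hnd).2 htl

-- the two membership predicates agree under distinct keys
theorem pred_congr (used : List String) (pkg : List (String × List String))
    (hnd : (pkg.map Prod.fst).Nodup) (x : String) :
    (!(pkg.filter (fun k => PySem.Set.contains used k.1)).any (fun kv => kv.2.contains x))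
      = (!(used.any (fun u => (assocGetD pkg u).contains x))) := by
  congr 1
  rw [Bool.eq_iff_iff]
  simp only [List.any_eq_true, List.mem_filter, List.contains_eq_mem, decide_eq_true_eq,
    PySem.Set.contains_iff]
  constructor
  · rintro ⟨kv, ⟨hkv, hu⟩, hd⟩
    exact ⟨kv.1, hu, by rw [find?_of_nodup_keys pkg kv hnd hkv]; exact hd⟩
  · rintro ⟨u, hu, hd⟩
    unfold assocGetD at hd
    cases hfind : pkg.find? (fun kv => kv.1 == u) with
    | none => rw [hfind] at hd; cases hd
    | some kv =>
      rw [hfind] at hd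
      have hkv := List.mem_of_find?_eq_some hfind
      have hku : kv.1 = u := by simpa using List.find?_some hfind
      exact ⟨kv, ⟨hkv, hku ▸ hu⟩, hd⟩

theorem find_all_top_modules_py_eq (used_modules : List String)
    (pkg : List (String × List String)) (hnd : (pkg.map Prod.fst).Nodup) :
    find_all_top_modules_py used_modules pkg
      = find_all_top_modules_py_alt used_modules pkg := by
  unfold find_all_top_modules_py find_all_top_modules_py_alt
  rw [foldl_nested_eq_filter]
  have hp : ∀ p : String → Bool,
      (PySem.Set.ofList used_modules).filter p = PySem.Set.ofList (used_modules.filter p) :=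
    fun p => filter_ofList p used_modules
  rw [hp]
  congr 1
  apply List.filter_congr
  intro x _
  exact pred_congr used_modules pkg hnd x

-- ===== VERDICT =====
theorem find_all_top_modules_py_spec : Claim_equal_find_all_top_modules_py := by
  intro used pkg _ hpre
  exact find_all_top_modules_py_eq used pkg hpre
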